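-- pv_equiv track=rewrite | github.com/wilmurillo-ai/Design-Assistant | .skills/openclaw-skills/skills/spzwin/create-xgjk-skill/scripts/skill-management/get_skills.py | find_detail
-- ===== SOURCE A (Python) =====
-- def find_detail(skills: list, query: str) -> dict | None:
--     """按 code 或 name 精确/模糊匹配单个 Skill"""
--     query_lower = query.lower()
--     # 精确匹配 code
--     for s in skills:
--         if (s.get("code") or "").lower() == query_lower:
--             return s
--     # 精确匹配 name
--     for s in skills:
--         if (s.get("name") or "").lower() == query_lower:
--             return s
--     # 模糊匹配
--     for s in skills:
--         code = (s.get("code") or "").lower()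
--         name = (s.get("name") or "").lower()
--         if query_lower in code or query_lower in name:
--             return s
--     return None
-- ===== SOURCE B (Python) =====
-- def find_detail(skills: list, query: str) -> dict | None:
--     """Single pass over skills, keeping the first hit of each priority tier."""
--     query_lower = query.lower()
--     first_code = first_name = first_fuzzy = None
--     for s in skills:
--         code = (s.get("code") or "").lower()
--         name = (s.get("name") or "").lower()
--         if first_code is None and code == query_lower:
--             first_code = s
--         elif first_name is None and name == query_lower:
--             first_name = s
--         if first_fuzzy is None and (query_lower in code or query_lower in name):
--             first_fuzzy = s
--     if first_code is not None:
--         return first_code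
--     if first_name is not None:
--         return first_name
--     return first_fuzzy
-- ===== Notes on version B (the rewrite author's own statement) =====
-- stated objective: alternative
-- what changed: Replaced A's three sequential scans of the whole list (one per match tier) with a single pass that records the first hit of each tier in three slots and picks the highest-priority slot at the end.
import Mathlib
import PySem

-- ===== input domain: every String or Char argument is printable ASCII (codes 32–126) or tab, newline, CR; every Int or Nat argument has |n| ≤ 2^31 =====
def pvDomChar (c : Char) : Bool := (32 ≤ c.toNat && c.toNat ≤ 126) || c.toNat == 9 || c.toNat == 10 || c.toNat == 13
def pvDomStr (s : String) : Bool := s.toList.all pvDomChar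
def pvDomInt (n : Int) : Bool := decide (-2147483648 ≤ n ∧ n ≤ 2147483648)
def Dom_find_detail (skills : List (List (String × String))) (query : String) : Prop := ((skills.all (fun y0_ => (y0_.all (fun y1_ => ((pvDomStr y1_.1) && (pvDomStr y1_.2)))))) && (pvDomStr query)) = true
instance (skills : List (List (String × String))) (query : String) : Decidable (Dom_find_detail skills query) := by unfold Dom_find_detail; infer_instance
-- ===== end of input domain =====

-- B replaces A's three sequential scans with one pass keeping the first hit per tier (objective: alternative decomposition, same cost).

-- shared helper: the Python idiom '(s.get(k) or "").lower()' used verbatim by both programs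
def pvField (s : List (String × String)) (k : String) : String :=
  PySem.Str.lower (match PySem.Dict.get? ⟨s⟩ k with
    | none => ""
    | some v => if v == "" then "" else v)

-- ===== PORT A =====
-- A's first for-loop: exact match on code, early return
def aLoopCode (ql : String) : List (List (String × String)) → Option (List (String × String))
  | [] => none
  | s :: t => if pvField s "code" == ql then some s else aLoopCode ql t

-- A's second for-loop: exact match on name, early return
def aLoopName (ql : String) : List (List (String × String)) → Option (List (String × String))
  | [] => none
  | s :: t => if pvField s "name" == ql then some s else aLoopName ql t

-- A's third for-loop: fuzzy match, early return
def aLoopFuzzy (ql : String) : List (List (String × String)) → Option (List (String × String))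
  | [] => none
  | s :: t =>
    if PySem.Str.isIn ql (pvField s "code") || PySem.Str.isIn ql (pvField s "name") then some s
    else aLoopFuzzy ql t

def find_detail (skills : List (List (String × String))) (query : String) : Option (List (String × String)) :=
  let ql := PySem.Str.lower query
  match aLoopCode ql skills with
  | some s => some s
  | none =>
    match aLoopName ql skills with
    | some s => some s
    | none => aLoopFuzzy ql skills

-- ===== PORT B =====
-- one iteration of B's loop body over the three slots
def bStep (ql : String)
    (st : Option (List (String × String)) × Option (List (String × String)) × Option (List (String × String)))
    (s : List (String × String)) :
    Option (List (String × String)) × Option (List (String × String)) × Option (List (String × String)) :=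
  let code := pvField s "code"
  let name := pvField s "name"
  let fc := st.1
  let fn := st.2.1
  let ff := st.2.2
  let (fc, fn) :=
    if fc.isNone && (code == ql) then (some s, fn)
    else if fn.isNone && (name == ql) then (fc, some s)
    else (fc, fn)
  let ff := if ff.isNone && (PySem.Str.isIn ql code || PySem.Str.isIn ql name) then some s else ff
  (fc, fn, ff)

def find_detail_alt (skills : List (List (String × String))) (query : String) : Option (List (String × String)) :=
  let ql := PySem.Str.lower query
  let r := skills.foldl (bStep ql) (none, none, none)
  match r.1 with
  | some s => some s
  | none =>
    match r.2.1 with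
    | some s => some s
    | none => r.2.2

-- ===== PRECONDITION & SPEC =====
def Spec_find_detail (skills : List (List (String × String))) (query : String) (out : Option (List (String × String))) : Prop := out = find_detail_alt skills query
instance (skills : List (List (String × String))) (query : String) (out : Option (List (String × String))) : Decidable (Spec_find_detail skills query out) := by unfold Spec_find_detail; infer_instance

-- ===== CLAIM (what is proved, stated in full; the proofs are below) =====
def Claim_equal_find_detail : Prop := ∀ (skills : List (List (String × String))) (query : String), Dom_find_detail skills query → Spec_find_detail skills query (find_detail skills query)

-- ===== LEMMAS AND PROOFS =====

-- A's loops are List.find? with the corresponding predicate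
theorem aLoopCode_eq_find? (ql : String) (l : List (List (String × String))) :
    aLoopCode ql l = l.find? (fun s => pvField s "code" == ql) := by
  induction l with
  | nil => rfl
  | cons s t ih =>
    cases hc : pvField s "code" == ql <;> simp [aLoopCode, List.find?, hc, ih]

theorem aLoopName_eq_find? (ql : String) (l : List (List (String × String))) :
    aLoopName ql l = l.find? (fun s => pvField s "name" == ql) := by
  induction l with
  | nil => rfl
  | cons s t ih =>
    cases hn : pvField s "name" == ql <;> simp [aLoopName, List.find?, hn, ih]

theorem aLoopFuzzy_eq_find? (ql : String) (l : List (List (String × String))) :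
    aLoopFuzzy ql l = l.find? (fun s => PySem.Str.isIn ql (pvField s "code") || PySem.Str.isIn ql (pvField s "name")) := by
  induction l with
  | nil => rfl
  | cons s t ih =>
    cases h1 : PySem.Chars.isIn ql.toList (pvField s "code").toList <;>
      cases h2 : PySem.Chars.isIn ql.toList (pvField s "name").toList <;>
        simp [aLoopFuzzy, List.find?, h1, h2, ih]

-- how one step of B's loop acts on each slot
theorem bStep_fst (ql : String) (st : _) (s : List (String × String)) :
    (bStep ql st s).1 = if st.1.isNone && (pvField s "code" == ql) then some s else st.1 := by
  simp only [bStep]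
  by_cases h1 : (st.1.isNone && (pvField s "code" == ql)) = true
  · simp [h1]
  · simp [h1]; split <;> rfl

theorem bStep_thd (ql : String) (st : _) (s : List (String × String)) :
    (bStep ql st s).2.2 =
      if st.2.2.isNone && (PySem.Str.isIn ql (pvField s "code") || PySem.Str.isIn ql (pvField s "name"))
      then some s else st.2.2 := by
  simp only [bStep]

theorem bStep_snd_of_no_code (ql : String) (fn ff : Option (List (String × String)))
    (s : List (String × String)) (hc : (pvField s "code" == ql) = false) :
    (bStep ql (none, fn, ff) s).2.1 = if fn.isNone && (pvField s "name" == ql) then some s else fn := by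
  simp only [bStep, hc]
  by_cases h2 : (fn.isNone && (pvField s "name" == ql)) = true <;> simp [h2]

theorem bStep_fst_of_no_code (ql : String) (fn ff : Option (List (String × String)))
    (s : List (String × String)) (hc : (pvField s "code" == ql) = false) :
    (bStep ql (none, fn, ff) s).1 = none := by
  rw [bStep_fst]; simp [hc]

-- the code slot of B's fold is the first code match (independent of the other slots)
theorem bFold_fst (ql : String) (l : List (List (String × String)))
    (fc fn ff : Option (List (String × String))) :
    (l.foldl (bStep ql) (fc, fn, ff)).1
      = fc.or (l.find? (fun s => pvField s "code" == ql)) := by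
  induction l generalizing fc fn ff with
  | nil => cases fc <;> rfl
  | cons s t ih =>
    simp only [List.foldl_cons, List.find?]
    have hs : bStep ql (fc, fn, ff) s = ((bStep ql (fc, fn, ff) s).1, (bStep ql (fc, fn, ff) s).2.1, (bStep ql (fc, fn, ff) s).2.2) := rfl
    rw [hs, ih, bStep_fst]
    cases fc with
    | none => cases hc : pvField s "code" == ql <;> simp
    | some v => simp

-- the fuzzy slot of B's fold is the first fuzzy match (independent of the other slots)
theorem bFold_fuzzy (ql : String) (l : List (List (String × String)))
    (fc fn ff : Option (List (String × String))) :
    (l.foldl (bStep ql) (fc, fn, ff)).2.2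
      = ff.or (l.find? (fun s => PySem.Str.isIn ql (pvField s "code") || PySem.Str.isIn ql (pvField s "name"))) := by
  induction l generalizing fc fn ff with
  | nil => cases ff <;> rfl
  | cons s t ih =>
    simp only [List.foldl_cons, List.find?]
    have hs : bStep ql (fc, fn, ff) s = ((bStep ql (fc, fn, ff) s).1, (bStep ql (fc, fn, ff) s).2.1, (bStep ql (fc, fn, ff) s).2.2) := rfl
    rw [hs, ih, bStep_thd]
    cases ff with
    | none =>
      cases hf : PySem.Str.isIn ql (pvField s "code") || PySem.Str.isIn ql (pvField s "name") <;> simp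
    | some v => simp

-- when no element matches on code, the name slot is the first name match
theorem bFold_name_of_no_code (ql : String) (l : List (List (String × String)))
    (fn ff : Option (List (String × String)))
    (h : ∀ s ∈ l, (pvField s "code" == ql) = false) :
    (l.foldl (bStep ql) (none, fn, ff)).2.1
      = fn.or (l.find? (fun s => pvField s "name" == ql)) := by
  induction l generalizing fn ff with
  | nil => cases fn <;> rfl
  | cons s t ih =>
    have hc : (pvField s "code" == ql) = false := h s (by simp)
    have ht : ∀ s' ∈ t, (pvField s' "code" == ql) = false := fun s' hs' => h s' (by simp [hs'])
    simp only [List.foldl_cons, List.find?]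
    have hs : bStep ql (none, fn, ff) s = ((bStep ql (none, fn, ff) s).1, (bStep ql (none, fn, ff) s).2.1, (bStep ql (none, fn, ff) s).2.2) := rfl
    rw [hs, bStep_fst_of_no_code ql fn ff s hc, ih _ _ ht, bStep_snd_of_no_code ql fn ff s hc]
    cases fn with
    | none => cases hn : pvField s "name" == ql <;> simp
    | some v => simp

-- ===== VERDICT (by name: the statement is the Claim_ definition above) =====
theorem find_detail_spec : Claim_equal_find_detail := by
  intro skills query _
  unfold Spec_find_detail
  show (match aLoopCode (PySem.Str.lower query) skills with
        | some s => some s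
        | none =>
          match aLoopName (PySem.Str.lower query) skills with
          | some s => some s
          | none => aLoopFuzzy (PySem.Str.lower query) skills)
      = (match (skills.foldl (bStep (PySem.Str.lower query)) (none, none, none)).1 with
        | some s => some s
        | none =>
          match (skills.foldl (bStep (PySem.Str.lower query)) (none, none, none)).2.1 with
          | some s => some s
          | none => (skills.foldl (bStep (PySem.Str.lower query)) (none, none, none)).2.2)
  generalize PySem.Str.lower query = ql
  rw [aLoopCode_eq_find?, aLoopName_eq_find?, aLoopFuzzy_eq_find?, bFold_fst]
  cases hC : skills.find? (fun s => pvField s "code" == ql) with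
  | some s => simp
  | none =>
    have hNoC : ∀ s ∈ skills, (pvField s "code" == ql) = false := by
      intro s hs
      simpa using List.find?_eq_none.mp hC s hs
    rw [bFold_name_of_no_code ql skills none none hNoC, bFold_fuzzy]
    simp
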